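-- pv_equiv track=rewrite | github.com/PKyouka/codewars | 7Kyu/Spinning Rings.py | spinning_rings
-- ===== SOURCE A (Python) =====
-- def spinning_rings(inner_max, outer_max):
--     inner = outer = moves = 0
--     while True:
--         inner = (inner - 1 + inner_max + 1) % (inner_max + 1)
--         outer = (outer + 1) % (outer_max + 1)
--         moves += 1
--         if inner == outer:
--             return moves
-- ===== SOURCE B (Python) =====
-- def _gcd(a, b):
--     while b:
--         a, b = b, a % b
--     return a
--
--
-- def spinning_rings(inner_max, outer_max):
--     # Positions after m moves are closed forms: inner = (-m) % (inner_max+1),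
--     # outer = m % (outer_max+1).  Any meeting value v satisfies -m = v (mod I)
--     # and m = v (mod O), hence g | 2m for g = gcd(|I|,|O|): the answer is a
--     # multiple of g (g odd) or g/2 (g even), so scan only those candidates.
--     I = inner_max + 1
--     O = outer_max + 1
--     g = _gcd(abs(I), abs(O))
--     s = g // 2 if g % 2 == 0 else g
--     m = s
--     while (-m) % I != m % O:
--         m += s
--     return m
-- ===== Notes on version B (the rewrite author's own statement) =====
-- stated objective: alternative
-- what changed: B drops the simulated ring states entirely: positions after m moves are the closed forms (-m)%(inner_max+1) and m%(outer_max+1), and since any meeting forces gcd|2m, B tests only multiples of the stride g (g odd) or g/2 (g even) derived from g=gcd(|inner_max+1|,|outer_max+1|).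
import Mathlib
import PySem

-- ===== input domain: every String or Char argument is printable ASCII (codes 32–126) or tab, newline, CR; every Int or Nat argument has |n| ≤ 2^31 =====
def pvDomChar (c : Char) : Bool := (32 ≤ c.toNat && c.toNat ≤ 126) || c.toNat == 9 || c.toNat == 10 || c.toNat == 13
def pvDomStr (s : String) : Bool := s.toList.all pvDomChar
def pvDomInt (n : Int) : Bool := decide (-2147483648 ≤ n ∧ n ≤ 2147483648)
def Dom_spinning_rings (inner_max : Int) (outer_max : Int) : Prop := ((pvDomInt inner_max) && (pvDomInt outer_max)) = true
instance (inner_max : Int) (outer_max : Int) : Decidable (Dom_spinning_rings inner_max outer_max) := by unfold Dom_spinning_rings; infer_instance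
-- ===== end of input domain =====

-- B replaces A's step-by-step simulation of the two ring states by a strided scan of
-- candidate move counts, using closed-form positions and a gcd-derived stride
-- (objective: alternative algorithm; same measured cost on typical inputs).

-- ===== PORT A =====
-- the `while True` loop, made total with fuel |((inner_max+1)*(outer_max+1))|+1
-- (a bound on the first meeting time, proved sufficient below)
def spinAux (inner_max : Int) (outer_max : Int) : Nat → Int → Int → Int → Int
  | 0, _, _, moves => moves
  | fuel + 1, inner, outer, moves =>
      let inner' := PySem.Int.mod (inner - 1 + inner_max + 1) (inner_max + 1)
      let outer' := PySem.Int.mod (outer + 1) (outer_max + 1)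
      let moves' := moves + 1
      if inner' = outer' then moves'
      else spinAux inner_max outer_max fuel inner' outer' moves'

def spinning_rings (inner_max : Int) (outer_max : Int) : Int :=
  spinAux inner_max outer_max (((inner_max + 1) * (outer_max + 1)).natAbs + 1) 0 0 0

-- ===== PORT B =====
-- helper _gcd of Source B (Euclid's loop), transliterated
def pyGcd (a b : Nat) : Nat :=
  if h : b = 0 then a else pyGcd b (a % b)
  termination_by b
  decreasing_by exact Nat.mod_lt _ (Nat.pos_of_ne_zero h)

-- the `while (-m) % I != m % O: m += s` loop of Source B, made total with fuel
def spinScan (I : Int) (O : Int) (s : Int) : Nat → Int → Int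
  | 0, m => m
  | fuel + 1, m =>
      if PySem.Int.mod (-m) I = PySem.Int.mod m O then m
      else spinScan I O s fuel (m + s)

def spinning_rings_alt (inner_max : Int) (outer_max : Int) : Int :=
  let I := inner_max + 1
  let O := outer_max + 1
  let g := pyGcd I.natAbs O.natAbs
  let s : Int := if g % 2 = 0 then ((g / 2 : Nat) : Int) else (g : Int)
  spinScan I O s ((I * O).natAbs + 1) s

-- ===== PRECONDITION & SPEC =====
-- Pre_ excludes exactly inner_max = -1 and outer_max = -1, where the Python A
-- raises ZeroDivisionError (modulus 0); B raises there as well.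
def Pre_spinning_rings (inner_max : Int) (outer_max : Int) : Prop :=
  inner_max ≠ -1 ∧ outer_max ≠ -1
instance (inner_max : Int) (outer_max : Int) : Decidable (Pre_spinning_rings inner_max outer_max) := by
  unfold Pre_spinning_rings; infer_instance

def pvWitness_spinning_rings : Int × Int := (2, 3)

def Spec_spinning_rings (inner_max : Int) (outer_max : Int) (out : Int) : Prop :=
  out = spinning_rings_alt inner_max outer_max
instance (inner_max : Int) (outer_max : Int) (out : Int) : Decidable (Spec_spinning_rings inner_max outer_max out) := by
  unfold Spec_spinning_rings; infer_instance

-- ===== CLAIM (what is proved, stated in full; the proofs are below) =====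
def Claim_equal_spinning_rings : Prop := ∀ (inner_max : Int) (outer_max : Int), Dom_spinning_rings inner_max outer_max → Pre_spinning_rings inner_max outer_max → Spec_spinning_rings inner_max outer_max (spinning_rings inner_max outer_max)

-- ===== LEMMAS AND PROOFS =====

-- `PySem.Int.mod` is Python's floor mod, i.e. `Int.fmod`
theorem pvMod_eq_fmod : PySem.Int.mod = Int.fmod := rfl

-- n divides a - (a % n)
theorem pvMod_sub_dvd (a n : Int) : n ∣ a - PySem.Int.mod a n :=
  ⟨a.fdiv n, by have h := Int.fmod_add_mul_fdiv a n; rw [pvMod_eq_fmod]; linarith⟩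

-- floor mod is invariant under congruence
theorem pvMod_congr {a b n : Int} (h : n ∣ a - b) : PySem.Int.mod a n = PySem.Int.mod b n := by
  obtain ⟨t, ht⟩ := h
  have hab : a = b + n * t := by linarith
  rw [pvMod_eq_fmod, hab, Int.add_mul_fmod_self_left]

theorem pvMod_zero_of_dvd {a n : Int} (h : n ∣ a) : PySem.Int.mod a n = 0 := by
  rw [pvMod_eq_fmod]; exact Int.fmod_eq_zero_of_dvd h

-- the meeting predicate: after m moves, inner = (-m) % I and outer = m % O
def PVmeet (I : Int) (O : Int) (m : Int) : Prop :=
  PySem.Int.mod (-m) I = PySem.Int.mod m O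

-- a least positive solution below a positive bound exists
theorem pvExistsLeast {Q : Int → Prop} {B : Nat} (hB : Q ((B : Nat) : Int)) (hBpos : 0 < B) :
    ∃ N : Int, 0 < N ∧ N ≤ (B : Int) ∧ Q N ∧ ∀ k : Int, 0 < k → k < N → ¬ Q k := by
  haveI : DecidablePred fun n : Nat => Q ((n : Int) + 1) := fun n => Classical.dec _
  have hT : ∃ n : Nat, Q ((n : Int) + 1) := by
    refine ⟨B - 1, ?_⟩
    have : ((B - 1 : Nat) : Int) + 1 = (B : Int) := by omega
    rw [this]; exact hB
  refine ⟨(Nat.find hT : Int) + 1, by positivity, ?_, Nat.find_spec hT, ?_⟩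
  · have h1 : Nat.find hT ≤ B - 1 := Nat.find_min' hT (by
      have : ((B - 1 : Nat) : Int) + 1 = (B : Int) := by omega
      rw [this]; exact hB)
    omega
  · intro k hk0 hkN hQk
    have hk : ((k.toNat - 1 : Nat) : Int) + 1 = k := by omega
    have hlt : k.toNat - 1 < Nat.find hT := by omega
    exact Nat.find_min hT hlt (by rw [hk]; exact hQk)

-- A's loop returns the least positive meeting time
theorem pvSpinAuxEq (inner_max outer_max N : Int)
    (hP : PVmeet (inner_max + 1) (outer_max + 1) N)
    (hmin : ∀ k : Int, 0 < k → k < N → ¬ PVmeet (inner_max + 1) (outer_max + 1) k) :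
    ∀ (fuel : Nat) (m : Int), 0 ≤ m → m < N → N ≤ m + fuel →
      spinAux inner_max outer_max fuel
        (PySem.Int.mod (-m) (inner_max + 1)) (PySem.Int.mod m (outer_max + 1)) m = N := by
  intro fuel
  induction fuel with
  | zero => intro m _ h1 h2; exfalso; push_cast at h2; omega
  | succ f ih =>
    intro m hm0 hmN hNf
    have hinner : PySem.Int.mod (PySem.Int.mod (-m) (inner_max + 1) - 1 + inner_max + 1) (inner_max + 1)
        = PySem.Int.mod (-(m + 1)) (inner_max + 1) := by
      apply pvMod_congr
      have h := dvd_sub (dvd_refl (inner_max + 1)) (pvMod_sub_dvd (-m) (inner_max + 1))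
      have e : (inner_max + 1) - (-m - PySem.Int.mod (-m) (inner_max + 1))
          = (PySem.Int.mod (-m) (inner_max + 1) - 1 + inner_max + 1) - (-(m + 1)) := by ring
      rwa [e] at h
    have houter : PySem.Int.mod (PySem.Int.mod m (outer_max + 1) + 1) (outer_max + 1)
        = PySem.Int.mod (m + 1) (outer_max + 1) := by
      apply pvMod_congr
      have h := (dvd_neg).mpr (pvMod_sub_dvd m (outer_max + 1))
      have e : -(m - PySem.Int.mod m (outer_max + 1))
          = (PySem.Int.mod m (outer_max + 1) + 1) - (m + 1) := by ring
      rwa [e] at h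
    simp only [spinAux, hinner, houter]
    by_cases hmeet : PySem.Int.mod (-(m + 1)) (inner_max + 1) = PySem.Int.mod (m + 1) (outer_max + 1)
    · rw [if_pos hmeet]
      -- m + 1 is a meeting time and m + 1 ≤ N, so m + 1 = N
      by_contra hne
      have hlt : m + 1 < N := by omega
      exact hmin (m + 1) (by omega) hlt hmeet
    · rw [if_neg hmeet]
      have hne : m + 1 ≠ N := fun h => hmeet (h ▸ hP)
      exact ih (m + 1) (by omega) (by omega) (by push_cast at hNf ⊢; omega)

-- B's loop, started on a multiple of the stride that divides N, returns N
theorem pvSpinScanEq (I O s N : Int) (hs : 0 < s)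
    (hP : PVmeet I O N)
    (hmin : ∀ k : Int, 0 < k → k < N → ¬ PVmeet I O k) :
    ∀ (fuel : Nat) (m : Int), 0 < m → m ≤ N → s ∣ (N - m) → N ≤ m + s * fuel →
      spinScan I O s fuel m = N := by
  intro fuel
  induction fuel with
  | zero =>
    intro m hm0 hmN _ hNf
    have : m = N := by push_cast at hNf; omega
    simp [spinScan, this]
  | succ f ih =>
    intro m hm0 hmN hdvd hNf
    simp only [spinScan]
    by_cases hmeet : PySem.Int.mod (-m) I = PySem.Int.mod m O
    · rw [if_pos hmeet]
      by_contra hne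
      exact hmin m hm0 (by omega) hmeet
    · rw [if_neg hmeet]
      have hne : m ≠ N := fun h => hmeet (h ▸ hP)
      have hsle : s ≤ N - m := Int.le_of_dvd (by omega) hdvd
      refine ih (m + s) (by omega) (by omega) ?_ ?_
      · have e : N - (m + s) = (N - m) - s := by ring
        rw [e]; exact dvd_sub hdvd (dvd_refl s)
      · push_cast at hNf ⊢; nlinarith

theorem pyGcd_eq_gcd (a b : Nat) : pyGcd a b = Nat.gcd a b := by
  induction b using Nat.strong_induction_on generalizing a with
  | _ b ih =>
    by_cases hb : b = 0
    · subst hb; rw [pyGcd]; simp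
    · rw [pyGcd, dif_neg hb, ih (a % b) (Nat.mod_lt _ (Nat.pos_of_ne_zero hb)) b,
          Nat.gcd_comm b (a % b), ← Nat.gcd_rec]
      exact Nat.gcd_comm b a

-- any meeting time is a multiple of the stride g (g odd) / g / 2 (g even)
theorem pvStrideDvd {I O N : Int} (hP : PVmeet I O N) :
    (if (pyGcd I.natAbs O.natAbs) % 2 = 0
       then (((pyGcd I.natAbs O.natAbs) / 2 : Nat) : Int)
       else ((pyGcd I.natAbs O.natAbs : Nat) : Int)) ∣ N := by
  have hgcd : pyGcd I.natAbs O.natAbs = Nat.gcd I.natAbs O.natAbs := pyGcd_eq_gcd _ _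
  set g : Nat := pyGcd I.natAbs O.natAbs with hg
  have hgI : (g : Int) ∣ I := by
    rw [hgcd]
    exact dvd_trans (Int.natCast_dvd_natCast.mpr (Nat.gcd_dvd_left _ _)) (Int.natAbs_dvd.mpr dvd_rfl)
  have hgO : (g : Int) ∣ O := by
    rw [hgcd]
    exact dvd_trans (Int.natCast_dvd_natCast.mpr (Nat.gcd_dvd_right _ _)) (Int.natAbs_dvd.mpr dvd_rfl)
  have h1 : (g : Int) ∣ -N - PySem.Int.mod (-N) I := dvd_trans hgI (pvMod_sub_dvd (-N) I)
  have h2 : (g : Int) ∣ N - PySem.Int.mod N O := dvd_trans hgO (pvMod_sub_dvd N O)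
  rw [PVmeet] at hP
  rw [hP] at h1
  have h2N : (g : Int) ∣ 2 * N := by
    have h := dvd_sub h2 h1
    have e : (N - PySem.Int.mod N O) - (-N - PySem.Int.mod N O) = 2 * N := by ring
    rwa [e] at h
  obtain ⟨t, ht⟩ := h2N
  split_ifs with he
  · -- g even: g / 2 divides N
    refine ⟨t, ?_⟩
    have hg2 : (g : Int) = 2 * ((g / 2 : Nat) : Int) := by
      have : g = 2 * (g / 2) := by omega
      exact_mod_cast this
    rw [hg2] at ht
    have h2' : (2 : Int) * N = 2 * (((g / 2 : Nat) : Int) * t) := by linarith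
    exact mul_left_cancel₀ (by norm_num : (2 : Int) ≠ 0) h2'
  · -- g odd: 2 divides t, so g divides N
    have h2t : (2 : Int) ∣ (g : Int) * t := ⟨N, by linarith⟩
    rcases (Int.Prime.dvd_mul' Nat.prime_two h2t) with hc | hc
    · exfalso
      have : (2 : Nat) ∣ g := by exact_mod_cast hc
      omega
    · obtain ⟨u, hu⟩ := hc
      refine ⟨u, ?_⟩
      rw [hu] at ht
      have h2' : (2 : Int) * N = 2 * ((g : Int) * u) := by push_cast at ht ⊢; linarith
      exact mul_left_cancel₀ (by norm_num : (2 : Int) ≠ 0) h2'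

theorem spinning_rings_spec : Claim_equal_spinning_rings := by
  unfold Claim_equal_spinning_rings Spec_spinning_rings
  intro im om _ hpre
  have hI : im + 1 ≠ 0 := by have := hpre.1; omega
  have hO : om + 1 ≠ 0 := by have := hpre.2; omega
  -- the meeting predicate has the bound |(im+1)*(om+1)| as a positive solution
  have hBpos : 0 < ((im + 1) * (om + 1)).natAbs := by
    rcases Int.natAbs_pos.mpr (mul_ne_zero hI hO) with h; exact h
  have hQB : PVmeet (im + 1) (om + 1) ((((im + 1) * (om + 1)).natAbs : Nat) : Int) := by
    rw [PVmeet]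
    have hd : (im + 1) * (om + 1) ∣ ((((im + 1) * (om + 1)).natAbs : Nat) : Int) :=
      Int.dvd_natAbs.mpr dvd_rfl
    rw [pvMod_zero_of_dvd (dvd_neg.mpr (dvd_trans (dvd_mul_right _ _) hd)),
        pvMod_zero_of_dvd (dvd_trans (dvd_mul_left _ _) hd)]
  obtain ⟨N, hN0, hNB, hNP, hNmin⟩ := pvExistsLeast hQB hBpos
  -- A's side
  have hA : spinning_rings im om = N := by
    rw [spinning_rings]
    have h0 : (0 : Int) = PySem.Int.mod (-(0 : Int)) (im + 1) := by
      simp [pvMod_eq_fmod]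
    have h0' : (0 : Int) = PySem.Int.mod (0 : Int) (om + 1) := by
      simp [pvMod_eq_fmod]
    calc spinAux im om (((im + 1) * (om + 1)).natAbs + 1) 0 0 0
        = spinAux im om (((im + 1) * (om + 1)).natAbs + 1)
            (PySem.Int.mod (-(0 : Int)) (im + 1)) (PySem.Int.mod (0 : Int) (om + 1)) 0 := by
          rw [← h0, ← h0']
      _ = N := pvSpinAuxEq im om N hNP hNmin _ 0 le_rfl hN0 (by
            have h := hNB; push_cast at h ⊢; omega)
  -- B's side
  have hB : spinning_rings_alt im om = N := by
    rw [spinning_rings_alt]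
    set g : Nat := pyGcd (im + 1).natAbs (om + 1).natAbs with hg
    set s : Int := if g % 2 = 0 then ((g / 2 : Nat) : Int) else (g : Int) with hs
    have hsN : s ∣ N := pvStrideDvd hNP
    have hgpos : 0 < g := by
      rw [hg, pyGcd_eq_gcd]
      exact Nat.gcd_pos_of_pos_left _ (Int.natAbs_pos.mpr hI)
    have hspos : 0 < s := by
      rw [hs]; split_ifs with he
      · have : 2 ≤ g := by omega
        have : 1 ≤ g / 2 := by omega
        exact_mod_cast Nat.pos_of_ne_zero (by omega)
      · exact_mod_cast hgpos
    have hsleN : s ≤ N := Int.le_of_dvd hN0 hsN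
    refine pvSpinScanEq (im + 1) (om + 1) s N hspos hNP hNmin _ s hspos hsleN ?_ ?_
    · exact dvd_sub hsN (dvd_refl s)
    · have h1 : (1 : Int) ≤ s := hspos
      have hfuel : (((((im + 1) * (om + 1)).natAbs + 1 : Nat)) : Int) ≥
          (((im + 1) * (om + 1)).natAbs : Int) + 1 := by push_cast; omega
      calc N ≤ (((im + 1) * (om + 1)).natAbs : Int) := hNB
        _ ≤ s * ((((im + 1) * (om + 1)).natAbs + 1 : Nat) : Int) := by push_cast; nlinarith
        _ ≤ s + s * ((((im + 1) * (om + 1)).natAbs + 1 : Nat) : Int) := by linarith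
  rw [hA, hB]
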